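-- pv_equiv track=rewrite | github.com/sixGodChan/NowCoder | class17/code03_Coffee.py | process
-- ===== SOURCE A (Python) =====
-- def process(drinks, a, b, index, washLine):
--     '''
--     drinks, a, b 固定参数
--     drinks[0...index-1]已洗完不用管
--     washLine表示清洗机何时可用
--     从时间点washLine开始洗完drinks[index...]这些杯子的最早时间
--     '''
--     if index == len(drinks) - 1:  # 最后一个杯
--         return min(max(drinks[index], washLine) + a, drinks[index] + b)
--     # 不是最后一杯
--     # drinks[index]洗
--     wash = max(drinks[index], washLine) + a
--     next1 = process(drinks, a, b, index + 1, wash)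
--     p1 = max(wash, next1)
--     # drinks[index]挥发
--     dry = drinks[index] + b
--     next2 = process(drinks, a, b, index + 1, washLine)
--     p2 = max(dry, next2)
--     return min(p1, p2)
-- ===== SOURCE B (Python) =====
-- def process(drinks, a, b, index, washLine):
--     # Exhaustive evaluation over wash/evaporate choice vectors: each bitmask of
--     # the mask enumerates one plan; evaluate each plan in a single left-to-right
--     # pass and take the minimum finish time.
--     n = len(drinks)
--     cups = [drinks[i] for i in range(index, n)]
--     best = None
--     for mask in range(1 << len(cups)):
--         bits = mask
--         w = washLine
--         finish = None
--         for d in cups: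
--             if bits & 1:
--                 w = max(d, w) + a
--                 t = w
--             else:
--                 t = d + b
--             bits >>= 1
--             finish = t if finish is None else max(finish, t)
--         best = finish if best is None else min(best, finish)
--     return best
-- ===== Notes on version B (the rewrite author's own statement) =====
-- stated objective: alternative
-- what changed: B replaces A's branching recursion by a non-recursive exhaustive enumeration: it materializes the remaining cups once, iterates over all wash/evaporate bitmasks, evaluates each plan in one left-to-right pass, and takes the minimum finish time; this is correct because max distributes over min, so A's recursion computes exactly the minimum over all choice vectors.
import Mathlib
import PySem

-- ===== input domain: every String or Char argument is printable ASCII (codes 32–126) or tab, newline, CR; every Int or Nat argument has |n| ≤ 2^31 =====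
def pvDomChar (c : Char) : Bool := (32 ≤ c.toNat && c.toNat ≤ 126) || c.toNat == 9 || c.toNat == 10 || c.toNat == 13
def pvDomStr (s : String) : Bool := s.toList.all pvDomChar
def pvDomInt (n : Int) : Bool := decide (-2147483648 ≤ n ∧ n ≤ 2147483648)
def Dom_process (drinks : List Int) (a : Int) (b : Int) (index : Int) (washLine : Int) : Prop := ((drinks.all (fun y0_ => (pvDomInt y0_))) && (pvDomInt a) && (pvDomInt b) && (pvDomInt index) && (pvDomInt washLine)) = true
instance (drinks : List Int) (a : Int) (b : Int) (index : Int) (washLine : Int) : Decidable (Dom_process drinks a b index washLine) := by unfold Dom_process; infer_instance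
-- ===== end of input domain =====

-- B replaces A's wash/evaporate branching recursion by a non-recursive exhaustive
-- enumeration of all choice bitmasks, evaluating each plan in one left-to-right pass
-- and taking the minimum finish time (an alternative algorithm of the same exponential cost).

-- drinks[i] (Python semantics, negative indices wrap); Pre_ guarantees every visited index is in range
def pyAt (drinks : List Int) (i : Int) : Int := (PySem.List.pyGet? drinks i).getD 0

-- ===== PORT A =====
-- fuel-indexed transcription of A's recursion; fuel is exhausted only outside Pre_process
def processGo (drinks : List Int) (a : Int) (b : Int) (fuel : Nat) (index : Int) (washLine : Int) : Int :=
  if index == (drinks.length : Int) - 1 then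
    min (max (pyAt drinks index) washLine + a) (pyAt drinks index + b)
  else
    match fuel with
    | 0 => 0
    | n + 1 =>
      let wash := max (pyAt drinks index) washLine + a
      let next1 := processGo drinks a b n (index + 1) wash
      let p1 := max wash next1
      let dry := pyAt drinks index + b
      let next2 := processGo drinks a b n (index + 1) washLine
      let p2 := max dry next2
      min p1 p2

def process (drinks : List Int) (a : Int) (b : Int) (index : Int) (washLine : Int) : Int :=
  processGo drinks a b ((drinks.length : Int) - 1 - index).toNat index washLine

-- ===== PORT B =====
-- one step of B's inner loop over the cups; state = (bits, w, finish).
-- Python 'bits & 1' is 'bits % 2' for every int, truthy iff = 1; 'bits >>= 1' is floor division by 2.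
def planStep (a : Int) (b : Int) (st : Int × Int × Option Int) (d : Int) : Int × Int × Option Int :=
  if PySem.Int.mod st.1 2 == 1 then
    let w' := max d st.2.1 + a
    (PySem.Int.floordiv st.1 2, w', some (match st.2.2 with | none => w' | some f => max f w'))
  else
    let t := d + b
    (PySem.Int.floordiv st.1 2, st.2.1, some (match st.2.2 with | none => t | some f => max f t))

-- B's inner loop: the finish time of the plan encoded by mask ('none' only for cups = [])
def planCost (a : Int) (b : Int) (cups : List Int) (mask : Int) (w : Int) : Option Int :=
  (cups.foldl (planStep a b) (mask, w, none)).2.2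

def process_alt (drinks : List Int) (a : Int) (b : Int) (index : Int) (washLine : Int) : Int :=
  let n := (drinks.length : Int)
  let cups := (PySem.List.pyRange index n 1).map (pyAt drinks)
  let best := (PySem.List.pyRange 0 (2 ^ cups.length) 1).foldl
    (fun best mask =>
      match best, planCost a b cups mask washLine with
      | none, cur => cur
      -- Python 'min(best, finish)': finish is an Int whenever cups ≠ [], i.e. on all of Pre_
      | some v, cur => some (min v (cur.getD 0)))
    none
  -- Python returns None only when cups = [], which Pre_ excludes
  best.getD 0

-- ===== PRECONDITION & SPEC =====
-- A raises IndexError whenever drinks is empty or index falls outside Python's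
-- negative-index range; exactly -len ≤ index ≤ len-1 returns normally.
def Pre_process (drinks : List Int) (a : Int) (b : Int) (index : Int) (washLine : Int) : Prop :=
  drinks ≠ [] ∧ -(drinks.length : Int) ≤ index ∧ index ≤ (drinks.length : Int) - 1
instance (drinks : List Int) (a : Int) (b : Int) (index : Int) (washLine : Int) : Decidable (Pre_process drinks a b index washLine) := by unfold Pre_process; infer_instance

def pvWitness_process : List Int × Int × Int × Int × Int := ([1, 1, 5, 5, 7, 10], 3, 10, 0, 0)

def Spec_process (drinks : List Int) (a : Int) (b : Int) (index : Int) (washLine : Int) (out : Int) : Prop := out = process_alt drinks a b index washLine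
instance (drinks : List Int) (a : Int) (b : Int) (index : Int) (washLine : Int) (out : Int) : Decidable (Spec_process drinks a b index washLine out) := by unfold Spec_process; infer_instance

-- ===== CLAIM (what is proved, stated in full; the proofs are below) =====
def Claim_equal_process : Prop := ∀ (drinks : List Int) (a : Int) (b : Int) (index : Int) (washLine : Int), Dom_process drinks a b index washLine → Pre_process drinks a b index washLine → Spec_process drinks a b index washLine (process drinks a b index washLine)

-- ===== LEMMAS AND PROOFS =====

-- A's recursion, rephrased as structural recursion on the list of remaining cups
def gRec (a b : Int) : List Int → Int → Int
  | [], _ => 0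
  | [d], w => min (max d w + a) (d + b)
  | d :: e :: tl, w =>
    let wash := max d w + a
    min (max wash (gRec a b (e :: tl) wash)) (max (d + b) (gRec a b (e :: tl) w))

-- the numeric value of B's plan-evaluation pass, for nonempty cups
def planVal (a b : Int) : List Int → Int → Int → Int
  | [], _, _ => 0
  | [d], bits, w => if PySem.Int.mod bits 2 == 1 then max d w + a else d + b
  | d :: e :: tl, bits, w =>
    if PySem.Int.mod bits 2 == 1 then
      let w' := max d w + a
      max w' (planVal a b (e :: tl) (PySem.Int.floordiv bits 2) w')
    else
      max (d + b) (planVal a b (e :: tl) (PySem.Int.floordiv bits 2) w)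

lemma processGo_eq_gRec (drinks : List Int) (a b : Int) :
    ∀ (fuel : Nat) (index w : Int), index ≤ (drinks.length : Int) - 1 →
      ((drinks.length : Int) - 1 - index).toNat ≤ fuel →
      processGo drinks a b fuel index w =
        gRec a b ((PySem.List.pyRange index (drinks.length : Int) 1).map (pyAt drinks)) w := by
  intro fuel
  induction fuel with
  | zero =>
    intro index w hle hf
    have hidx : index = (drinks.length : Int) - 1 := by omega
    have hr : PySem.List.pyRange index (drinks.length : Int) 1 = [index] := by
      rw [show (drinks.length : Int) = index + 1 by omega]
      exact PySem.List.pyRange_one_singleton index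
    rw [hr]
    simp [processGo, hidx, gRec]
  | succ n ih =>
    intro index w hle hf
    by_cases hidx : index = (drinks.length : Int) - 1
    · have hr : PySem.List.pyRange index (drinks.length : Int) 1 = [index] := by
        rw [show (drinks.length : Int) = index + 1 by omega]
        exact PySem.List.pyRange_one_singleton index
      rw [hr]
      simp [processGo, hidx, gRec]
    · have hlt : index < (drinks.length : Int) - 1 := lt_of_le_of_ne hle hidx
      have h1 : PySem.List.pyRange index (drinks.length : Int) 1 =
          index :: PySem.List.pyRange (index + 1) (drinks.length : Int) 1 :=
        PySem.List.pyRange_one_cons (by omega)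
      have h2 : PySem.List.pyRange (index + 1) (drinks.length : Int) 1 =
          (index + 1) :: PySem.List.pyRange (index + 2) (drinks.length : Int) 1 := by
        rw [show index + 2 = (index + 1) + 1 by ring]
        exact PySem.List.pyRange_one_cons (by omega)
      simp only [processGo, beq_iff_eq, if_neg hidx]
      rw [ih (index + 1) _ (by omega) (by omega), ih (index + 1) _ (by omega) (by omega)]
      rw [h1, h2]
      simp only [List.map_cons, gRec]

lemma foldl_planStep_some (a b : Int) :
    ∀ (cups : List Int) (bits w f : Int), cups ≠ [] →
      (cups.foldl (planStep a b) (bits, w, some f)).2.2 = some (max f (planVal a b cups bits w)) := by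
  intro cups
  induction cups with
  | nil => intro _ _ _ h; exact absurd rfl h
  | cons d rest ih =>
    intro bits w f _
    rw [List.foldl_cons]
    cases rest with
    | nil =>
      by_cases hm : PySem.Int.mod bits 2 = 1
      · simp only [planStep, beq_iff_eq, if_pos hm, List.foldl_nil, planVal]
      · simp only [planStep, beq_iff_eq, if_neg hm, List.foldl_nil, planVal]
    | cons e tl =>
      by_cases hm : PySem.Int.mod bits 2 = 1
      · simp only [planStep, beq_iff_eq, if_pos hm]
        rw [ih _ _ _ (by simp)]
        simp only [planVal, beq_iff_eq, if_pos hm, max_assoc]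
      · simp only [planStep, beq_iff_eq, if_neg hm]
        rw [ih _ _ _ (by simp)]
        simp only [planVal, beq_iff_eq, if_neg hm, max_assoc]

lemma planCost_eq (a b : Int) (cups : List Int) (bits w : Int) (h : cups ≠ []) :
    planCost a b cups bits w = some (planVal a b cups bits w) := by
  cases cups with
  | nil => exact absurd rfl h
  | cons d rest =>
    unfold planCost
    rw [List.foldl_cons]
    cases rest with
    | nil =>
      by_cases hm : PySem.Int.mod bits 2 = 1
      · simp only [planStep, beq_iff_eq, if_pos hm, List.foldl_nil, planVal]
      · simp only [planStep, beq_iff_eq, if_neg hm, List.foldl_nil, planVal]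
    | cons e tl =>
      by_cases hm : PySem.Int.mod bits 2 = 1
      · simp only [planStep, beq_iff_eq, if_pos hm]
        rw [foldl_planStep_some a b _ _ _ _ (by simp)]
        simp only [planVal, beq_iff_eq, if_pos hm]
      · simp only [planStep, beq_iff_eq, if_neg hm]
        rw [foldl_planStep_some a b _ _ _ _ (by simp)]
        simp only [planVal, beq_iff_eq, if_neg hm]

lemma gRec_le_planVal (a b : Int) :
    ∀ (cups : List Int) (bits w : Int), cups ≠ [] →
      gRec a b cups w ≤ planVal a b cups bits w := by
  intro cups
  induction cups with
  | nil => intro _ _ h; exact absurd rfl h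
  | cons d rest ih =>
    intro bits w _
    cases rest with
    | nil =>
      by_cases hm : PySem.Int.mod bits 2 = 1
      · simp only [planVal, beq_iff_eq, if_pos hm, gRec]; exact min_le_left _ _
      · simp only [planVal, beq_iff_eq, if_neg hm, gRec]; exact min_le_right _ _
    | cons e tl =>
      by_cases hm : PySem.Int.mod bits 2 = 1
      · simp only [planVal, beq_iff_eq, if_pos hm, gRec]
        exact le_trans (min_le_left _ _)
          (max_le_max le_rfl (ih (PySem.Int.floordiv bits 2) (max d w + a) (by simp)))
      · simp only [planVal, beq_iff_eq, if_neg hm, gRec]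
        exact le_trans (min_le_right _ _)
          (max_le_max le_rfl (ih (PySem.Int.floordiv bits 2) w (by simp)))

lemma mod_floordiv_bit (k c : Int) (hc : c = 0 ∨ c = 1) :
    PySem.Int.mod (2 * k + c) 2 = c ∧ PySem.Int.floordiv (2 * k + c) 2 = k := by
  rw [PySem.Int.mod_eq_emod_of_pos (by omega : (0:Int) < 2), PySem.Int.floordiv_eq_ediv_of_pos (by omega : (0:Int) < 2)]
  omega

lemma exists_planVal_eq_gRec (a b : Int) :
    ∀ (cups : List Int) (w : Int), cups ≠ [] →
      ∃ bits : Int, 0 ≤ bits ∧ bits < 2 ^ cups.length ∧ planVal a b cups bits w = gRec a b cups w := by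
  intro cups
  induction cups with
  | nil => intro _ h; exact absurd rfl h
  | cons d rest ih =>
    intro w _
    cases rest with
    | nil =>
      by_cases hle : max d w + a ≤ d + b
      · refine ⟨1, by omega, by norm_num, ?_⟩
        have h1 : PySem.Int.mod 1 2 = 1 := by
          have := mod_floordiv_bit 0 1 (Or.inr rfl); simpa using this.1
        simp only [planVal, beq_iff_eq, if_pos h1, gRec]
        exact (min_eq_left hle).symm
      · refine ⟨0, le_rfl, by norm_num, ?_⟩
        have h0 : PySem.Int.mod 0 2 = 0 := by
          have := mod_floordiv_bit 0 0 (Or.inl rfl); simpa using this.1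
        simp only [planVal, beq_iff_eq, h0, gRec]
        norm_num
        exact (not_le.mp hle).le
    | cons e tl =>
      have hpow : (2:Int) ^ (d :: e :: tl).length = 2 * 2 ^ (e :: tl).length := by
        simp [List.length_cons, pow_succ]; ring
      by_cases hle : max (max d w + a) (gRec a b (e :: tl) (max d w + a)) ≤
          max (d + b) (gRec a b (e :: tl) w)
      · obtain ⟨bits', h0, hlt, heq⟩ := ih (max d w + a) (by simp)
        refine ⟨2 * bits' + 1, by omega, by rw [hpow]; omega, ?_⟩
        obtain ⟨hm, hd⟩ := mod_floordiv_bit bits' 1 (Or.inr rfl)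
        simp only [planVal, beq_iff_eq, if_pos hm, hd, heq, gRec]
        exact (min_eq_left hle).symm
      · obtain ⟨bits', h0, hlt, heq⟩ := ih w (by simp)
        refine ⟨2 * bits', by omega, by rw [hpow]; omega, ?_⟩
        obtain ⟨hm, hd⟩ := mod_floordiv_bit bits' 0 (Or.inl rfl)
        rw [add_zero] at hm hd
        simp only [planVal, beq_iff_eq, hm, hd, heq, gRec,
          if_neg (show ¬(0:Int) = 1 by norm_num)]
        exact (min_eq_right (le_of_not_ge hle)).symm

lemma fold_min_spec (f : Int → Int) :
    ∀ (L : List Int) (v : Int),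
      ∃ r, L.foldl (fun best mask => match best with
            | none => some (f mask)
            | some x => some (min x (f mask))) (some v) = some r ∧
        r ≤ v ∧ (∀ x ∈ L, r ≤ f x) ∧ (r = v ∨ ∃ x ∈ L, r = f x) := by
  intro L
  induction L with
  | nil => exact fun v => ⟨v, rfl, le_rfl, by simp, Or.inl rfl⟩
  | cons m rest ih =>
    intro v
    obtain ⟨r, hfold, hle, hall, hwit⟩ := ih (min v (f m))
    refine ⟨r, hfold, le_trans hle (min_le_left _ _), ?_, ?_⟩
    · intro x hx
      rcases List.mem_cons.mp hx with rfl | hx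
      · exact le_trans hle (min_le_right _ _)
      · exact hall x hx
    · rcases hwit with rfl | ⟨x, hx, hr⟩
      · rcases le_total v (f m) with h | h
        · exact Or.inl (min_eq_left h)
        · exact Or.inr ⟨m, List.mem_cons_self, (min_eq_right h)⟩
      · exact Or.inr ⟨x, List.mem_cons_of_mem _ hx, hr⟩

-- ===== VERDICT (by name: the statement is the Claim_ definition above) =====
theorem process_spec : Claim_equal_process := by
  intro drinks a b index washLine _ hpre
  obtain ⟨hne, hlo, hhi⟩ := hpre
  show process drinks a b index washLine = process_alt drinks a b index washLine
  have hlenpos : 0 < (drinks.length : Int) := by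
    cases drinks with
    | nil => exact absurd rfl hne
    | cons x xs => simp
  have hcons : PySem.List.pyRange index (drinks.length : Int) 1 =
      index :: PySem.List.pyRange (index + 1) (drinks.length : Int) 1 :=
    PySem.List.pyRange_one_cons (by omega)
  have hcne : ((PySem.List.pyRange index (drinks.length : Int) 1).map (pyAt drinks)) ≠ [] := by
    rw [hcons]; simp
  -- the value of the minimum
  have hA : process drinks a b index washLine =
      gRec a b ((PySem.List.pyRange index (drinks.length : Int) 1).map (pyAt drinks)) washLine :=
    processGo_eq_gRec drinks a b _ index washLine hhi le_rfl
  -- name the cups and the per-mask cost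
  set cups := (PySem.List.pyRange index (drinks.length : Int) 1).map (pyAt drinks) with hcups
  set F := fun mask => planVal a b cups mask washLine with hF
  -- the outer fold of B's port, with planCost evaluated
  have hstep : (fun (best : Option Int) mask =>
        match best, planCost a b cups mask washLine with
        | none, cur => cur
        | some v, cur => some (min v (cur.getD 0))) =
      (fun (best : Option Int) mask => match best with
        | none => some (F mask)
        | some x => some (min x (F mask))) := by
    funext best mask
    rw [planCost_eq a b cups mask washLine hcne]
    cases best <;> rfl
  have hpow : (0:Int) < 2 ^ cups.length := by positivity
  have hL : PySem.List.pyRange 0 (2 ^ cups.length) 1 =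
      0 :: PySem.List.pyRange 1 (2 ^ cups.length) 1 := by
    have := PySem.List.pyRange_one_cons (a := (0:Int)) (b := 2 ^ cups.length) hpow
    simpa using this
  have halt : process_alt drinks a b index washLine =
      (((PySem.List.pyRange 0 (2 ^ cups.length) 1).foldl
        (fun (best : Option Int) mask =>
          match best, planCost a b cups mask washLine with
          | none, cur => cur
          | some v, cur => some (min v (cur.getD 0))) none).getD 0) := rfl
  rw [hA, halt, hstep, hL]
  simp only [List.foldl_cons]
  obtain ⟨r, hfold, hr0, hall, hwit⟩ := fold_min_spec F (PySem.List.pyRange 1 (2 ^ cups.length) 1) (F 0)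
  rw [hfold]
  -- r ≥ gRec : every plan value dominates A's optimum
  have hge : gRec a b cups washLine ≤ r := by
    rcases hwit with rfl | ⟨x, _, hr⟩
    · exact gRec_le_planVal a b cups 0 washLine hcne
    · rw [hr]; exact gRec_le_planVal a b cups x washLine hcne
  -- r ≤ gRec : the optimal plan is one of the enumerated masks
  have hle : r ≤ gRec a b cups washLine := by
    obtain ⟨bits, hb0, hblt, hbeq⟩ := exists_planVal_eq_gRec a b cups washLine hcne
    rcases eq_or_lt_of_le hb0 with rfl | hbpos
    · rw [← hbeq]; exact hr0
    · have hmem : bits ∈ PySem.List.pyRange 1 (2 ^ cups.length) 1 :=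
        PySem.List.mem_pyRange_one.mpr ⟨by omega, hblt⟩
      rw [← hbeq]
      exact hall bits hmem
  have : r = gRec a b cups washLine := le_antisymm hle hge
  rw [this]
  rfl
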